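-- pv_equiv track=rewrite | github.com/sinmetrocloudapi/acceptcloudapi | mystatistics/stats/estatisticas.py | calcularAmpMovel
-- ===== SOURCE A (Python) =====
-- def calcularAmpMovel(lista, index):
--
--     nAmostras = len(lista)
--     amplitudeMovel = 0
--
--     if index == 0:
--         amplitudeMovel = None
--         pass
--     else:
--         for i in range(0, nAmostras):
--             if i == index:
--                 amplitudeMovel = abs(lista[index] - lista[index-1])
--                 break
--             pass
--         pass
--
--     return amplitudeMovel
-- ===== SOURCE B (Python) =====
-- def calcularAmpMovel(lista, index):
--     if index == 0:
--         return None
--     if 1 <= index < len(lista):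
--         return abs(lista[index] - lista[index - 1])
--     return 0
-- ===== Notes on version B (the rewrite author's own statement) =====
-- stated objective: simpler
-- what changed: Replaces the linear scan over range(len(lista)) searching for i == index with a direct bounds check 1 <= index < len(lista) and a closed-form answer.
import Mathlib
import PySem

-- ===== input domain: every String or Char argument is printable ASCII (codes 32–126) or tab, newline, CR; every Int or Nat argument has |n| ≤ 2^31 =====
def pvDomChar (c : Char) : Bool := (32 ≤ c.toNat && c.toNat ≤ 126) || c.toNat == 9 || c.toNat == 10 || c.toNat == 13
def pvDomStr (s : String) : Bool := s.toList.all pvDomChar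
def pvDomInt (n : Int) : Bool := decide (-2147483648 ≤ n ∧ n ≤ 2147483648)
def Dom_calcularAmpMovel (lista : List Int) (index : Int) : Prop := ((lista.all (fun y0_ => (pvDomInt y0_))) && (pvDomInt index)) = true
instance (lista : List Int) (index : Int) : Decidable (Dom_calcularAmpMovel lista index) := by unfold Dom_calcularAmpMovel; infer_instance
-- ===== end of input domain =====

-- B replaces A's linear scan for i == index with a direct bounds check; simpler and more direct.


-- ===== PORT A =====
-- A's for-loop over range(0, nAmostras) with break: structural recursion over the index list,
-- carrying the accumulator amplitudeMovel. The indexing lista[index], lista[index-1] happens only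
-- when i == index with 0 ≤ i < len(lista) (and index ≠ 0), so pyGet? always returns some there;
-- .getD 0 is exact on that path.
def calcAmpLoopA (lista : List Int) (index : Int) : List Nat → Option Int → Option Int
  | [], acc => acc
  | i :: rest, acc =>
      if (i : Int) = index then
        some |((PySem.List.pyGet? lista index).getD 0) - ((PySem.List.pyGet? lista (index - 1)).getD 0)|
      else
        calcAmpLoopA lista index rest acc

def calcularAmpMovel (lista : List Int) (index : Int) : Option Int :=
  let nAmostras := lista.length
  if index = 0 then none
  else calcAmpLoopA lista index (List.range nAmostras) (some 0)

-- ===== PORT B =====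
def calcularAmpMovel_alt (lista : List Int) (index : Int) : Option Int :=
  if index = 0 then none
  else if 1 ≤ index ∧ index < (lista.length : Int) then
    some |((PySem.List.pyGet? lista index).getD 0) - ((PySem.List.pyGet? lista (index - 1)).getD 0)|
  else some 0

-- ===== PRECONDITION & SPEC =====
def Spec_calcularAmpMovel (lista : List Int) (index : Int) (out : Option Int) : Prop := out = calcularAmpMovel_alt lista index
instance (lista : List Int) (index : Int) (out : Option Int) : Decidable (Spec_calcularAmpMovel lista index out) := by unfold Spec_calcularAmpMovel; infer_instance

-- ===== CLAIM (what is proved, stated in full; the proofs are below) =====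
def Claim_equal_calcularAmpMovel : Prop := ∀ (lista : List Int) (index : Int), Dom_calcularAmpMovel lista index → Spec_calcularAmpMovel lista index (calcularAmpMovel lista index)

-- ===== LEMMAS AND PROOFS =====

-- The loop returns the abs-difference iff index occurs in the scanned index list, else the accumulator.
theorem calcAmpLoopA_eq (lista : List Int) (index : Int) (l : List Nat) (acc : Option Int) :
    calcAmpLoopA lista index l acc =
      if ∃ i ∈ l, (i : Int) = index then
        some |((PySem.List.pyGet? lista index).getD 0) - ((PySem.List.pyGet? lista (index - 1)).getD 0)|
      else acc := by
  induction l with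
  | nil => simp [calcAmpLoopA]
  | cons i rest ih =>
    by_cases h : (i : Int) = index
    · simp [calcAmpLoopA, h]
    · simp [calcAmpLoopA, h, ih]

theorem exists_range_int (n : Nat) (index : Int) :
    (∃ i ∈ List.range n, (i : Int) = index) ↔ (1 ≤ index ∧ index < (n : Int)) ∨ index = 0 ∧ 0 < n := by
  constructor
  · rintro ⟨i, hi, rfl⟩
    simp only [List.mem_range] at hi
    rcases Nat.eq_zero_or_pos i with h0 | h1
    · exact Or.inr ⟨by simp [h0], by omega⟩
    · exact Or.inl ⟨by exact_mod_cast h1, by exact_mod_cast hi⟩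
  · rintro (⟨h1, h2⟩ | ⟨h0, hn⟩)
    · exact ⟨index.toNat, by simp [List.mem_range]; omega, by omega⟩
    · exact ⟨0, by simp [List.mem_range]; omega, by simp [h0]⟩

-- ===== VERDICT (by name: the statement is the Claim_ definition above) =====
theorem calcularAmpMovel_spec : Claim_equal_calcularAmpMovel := by
  intro lista index _
  unfold Spec_calcularAmpMovel calcularAmpMovel calcularAmpMovel_alt
  by_cases h0 : index = 0
  · simp [h0]
  · simp only [h0, if_false, calcAmpLoopA_eq, exists_range_int]
    by_cases h : 1 ≤ index ∧ index < (lista.length : Int)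
    · simp [h, h0]
    · simp [h, h0]
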